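-- pv_equiv track=rewrite | github.com/BenjaminAnding/sturdy-chainsaw | Level3/find-the-access-codes_solution.py | solution
-- ===== SOURCE A (Python) =====
-- def solution(l):
--     counter = [0] * len(l)
--     triples = 0
--     for i in range(0,len(l)):
--         for j in range(0, i):
--             if l[i] % l[j] == 0:
--                 counter[i] += 1
--                 triples += counter[j]
--     return triples
-- ===== SOURCE B (Python) =====
-- def solution(l):
--     n = len(l)
--     # left[j]: how many earlier elements divide l[j]; right[j]: how many later elements l[j] divides
--     left = [sum(1 for m in range(j) if l[j] % l[m] == 0) for j in range(n)]
--     right = [sum(1 for k in range(n) if k > j and l[k] % l[j] == 0) for j in range(n)]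
--     return sum(L * R for L, R in zip(left, right))
-- ===== Notes on version B (the rewrite author's own statement) =====
-- stated objective: alternative
-- what changed: Replaces A's running counter interleaved with the triple count by two independent per-index count arrays (earlier divisors / later multiples of the middle element) multiplied and summed, i.e. the double sum is regrouped around the middle element.
import Mathlib
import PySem

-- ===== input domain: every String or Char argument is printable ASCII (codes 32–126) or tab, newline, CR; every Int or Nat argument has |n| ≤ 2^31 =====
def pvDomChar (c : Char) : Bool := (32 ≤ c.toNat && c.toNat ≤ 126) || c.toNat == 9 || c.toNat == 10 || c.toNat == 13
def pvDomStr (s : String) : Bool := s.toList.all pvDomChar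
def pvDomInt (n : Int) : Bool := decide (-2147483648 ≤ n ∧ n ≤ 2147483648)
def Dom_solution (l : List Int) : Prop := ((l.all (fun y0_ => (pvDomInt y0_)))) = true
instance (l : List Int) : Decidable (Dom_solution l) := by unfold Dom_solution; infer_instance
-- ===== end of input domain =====

-- B regroups A's interleaved running-counter accumulation into independent left/right counts per middle element (alternative decomposition, same cost).

-- ===== PORT A =====
-- Loop indices from range(len(l)) / range(i) are in-range Nats, so l[i] is ported as l.getD i 0 (exact here).
def solution (l : List Int) : Int :=
  let n := l.length
  let st := (List.range n).foldl (fun (st : List Int × Int) i =>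
      (List.range i).foldl (fun st j =>
        if PySem.Int.mod (l.getD i 0) (l.getD j 0) = 0 then
          let c := st.1.set i (st.1.getD i 0 + 1)
          (c, st.2 + c.getD j 0)
        else st) st)
    (List.replicate n 0, 0)
  st.2

-- ===== PORT B =====
-- left[j] of Source B: number of m < j with l[j] % l[m] == 0
def cntL (l : List Int) (j : Nat) : Int :=
  (List.range j).foldl (fun a m => if PySem.Int.mod (l.getD j 0) (l.getD m 0) = 0 then a + 1 else a) 0

-- right[j] of Source B: number of k in range(n) with k > j and l[k] % l[j] == 0
def cntR (l : List Int) (n j : Nat) : Int :=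
  (List.range n).foldl (fun a k => if j < k ∧ PySem.Int.mod (l.getD k 0) (l.getD j 0) = 0 then a + 1 else a) 0

def solution_alt (l : List Int) : Int :=
  let n := l.length
  let left := (List.range n).map (cntL l)
  let right := (List.range n).map (cntR l n)
  (left.zip right).foldl (fun a p => a + p.1 * p.2) 0

-- ===== PRECONDITION & SPEC =====
-- Pre_ excludes exactly the inputs on which Python A raises ZeroDivisionError: a zero anywhere
-- before the last element is later used as a divisor (B raises ZeroDivisionError there too).
def Pre_solution (l : List Int) : Prop := ∀ x ∈ l.dropLast, x ≠ 0
instance (l : List Int) : Decidable (Pre_solution l) := by unfold Pre_solution; infer_instance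
def pvWitness_solution : List Int := [1, 1, 2, 4, 8]
def Spec_solution (l : List Int) (out : Int) : Prop := out = solution_alt l
instance (l : List Int) (out : Int) : Decidable (Spec_solution l out) := by unfold Spec_solution; infer_instance

-- ===== CLAIM (what is proved, stated in full; the proofs are below) =====
def Claim_equal_solution : Prop := ∀ (l : List Int), Dom_solution l → Pre_solution l → Spec_solution l (solution l)

-- ===== LEMMAS AND PROOFS =====

-- mathematical middle layer: left/right counts as 0/1 sums
def Lv (l : List Int) (j : Nat) : Int :=
  ((List.range j).map (fun m => if PySem.Int.mod (l.getD j 0) (l.getD m 0) = 0 then (1:Int) else 0)).sum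
def Rv (l : List Int) (n j : Nat) : Int :=
  ((List.range n).map (fun k => if j < k ∧ PySem.Int.mod (l.getD k 0) (l.getD j 0) = 0 then (1:Int) else 0)).sum

theorem foldl_addf (g : Nat → Int) : ∀ (js : List Nat) (a : Int),
    js.foldl (fun a m => a + g m) a = a + (js.map g).sum := by
  intro js
  induction js with
  | nil => simp
  | cons j js ih => intro a; simp [ih]; ring

theorem foldl_if_count (P : Nat → Prop) [DecidablePred P] (js : List Nat) (a : Int) :
    js.foldl (fun a m => if P m then a + 1 else a) a
      = a + (js.map (fun m => if P m then (1:Int) else 0)).sum := by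
  have h : (fun (a : Int) (m : Nat) => if P m then a + 1 else a)
      = fun a m => a + (if P m then (1:Int) else 0) := by
    funext a m; split <;> simp
  rw [h, foldl_addf]

theorem sum_map_range (g : Nat → Int) (n : Nat) :
    ((List.range n).map g).sum = ∑ j ∈ Finset.range n, g j := by
  induction n with
  | zero => simp
  | succ n ih => rw [List.range_succ]; simp [Finset.sum_range_succ, ih]

theorem getD_set_ne (c : List Int) (i j : Nat) (a d : Int) (h : j ≠ i) :
    (c.set i a).getD j d = c.getD j d := by
  simp [List.getD_eq_getElem?_getD, List.getElem?_set_ne (Ne.symm h)]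

theorem getD_set_self (c : List Int) (i : Nat) (a d : Int) (h : i < c.length) :
    (c.set i a).getD i d = a := by
  simp [List.getD_eq_getElem?_getD, h]

theorem set_getD_self (c : List Int) (i : Nat) (d : Int) (h : i < c.length) :
    c.set i (c.getD i d) = c := by
  rw [List.getD_eq_getElem?_getD, List.getElem?_eq_getElem h]
  simp

-- the counter vector after the first i outer iterations: entries below i are final
def Cvec (l : List Int) (i : Nat) : List Int :=
  (List.range l.length).map (fun j => if j < i then Lv l j else 0)

theorem Cvec_zero (l : List Int) : Cvec l 0 = List.replicate l.length 0 := by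
  simp [Cvec, List.map_const']

theorem Cvec_length (l : List Int) (i : Nat) : (Cvec l i).length = l.length := by
  simp [Cvec]

theorem Cvec_getD (l : List Int) (i j : Nat) (h : j < l.length) :
    (Cvec l i).getD j 0 = if j < i then Lv l j else 0 := by
  simp [Cvec, List.getD_eq_getElem?_getD, List.getElem?_map, List.getElem?_range h]

theorem Cvec_succ (l : List Int) (i : Nat) (h : i < l.length) :
    Cvec l (i + 1) = (Cvec l i).set i (Lv l i) := by
  apply List.ext_getElem
  · simp [Cvec]
  · intro k hk1 hk2
    simp only [Cvec, List.getElem_set, List.getElem_map, List.getElem_range]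
    have hk : k < l.length := by simpa [Cvec] using hk1
    by_cases hki : k = i
    · subst hki; simp
    · rw [if_neg (by omega : ¬ i = k)]
      split_ifs <;> first | rfl | omega

-- A's inner loop, characterized: counter[i] gains the divisor count, triples gains the counter values
theorem inner_loop (l : List Int) (i : Nat) :
    ∀ (js : List Nat) (c : List Int) (t : Int), c.length = l.length → i < l.length →
      (∀ j ∈ js, j ≠ i) →
      js.foldl (fun st j =>
        if PySem.Int.mod (l.getD i 0) (l.getD j 0) = 0 then
          let c := st.1.set i (st.1.getD i 0 + 1)
          (c, st.2 + c.getD j 0)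
        else st) (c, t)
      = (c.set i (c.getD i 0 + (js.map (fun j => if PySem.Int.mod (l.getD i 0) (l.getD j 0) = 0 then (1:Int) else 0)).sum),
         t + (js.map (fun j => if PySem.Int.mod (l.getD i 0) (l.getD j 0) = 0 then c.getD j 0 else 0)).sum) := by
  intro js
  induction js with
  | nil =>
    intro c t hlen hi _
    simp only [List.foldl_nil, List.map_nil, List.sum_nil, add_zero]
    rw [set_getD_self c i 0 (by omega)]
  | cons j js ih =>
    intro c t hlen hi hne
    have hji : j ≠ i := hne j (by simp)
    simp only [List.foldl_cons, List.map_cons, List.sum_cons]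
    by_cases hd : PySem.Int.mod (l.getD i 0) (l.getD j 0) = 0
    · rw [if_pos (show PySem.Int.mod (l.getD i 0) (l.getD j 0) = 0 from hd)]
      rw [getD_set_ne c i j _ 0 hji]
      rw [ih (c.set i (c.getD i 0 + 1)) _ (by simpa using hlen) hi
          (fun j' hj' => hne j' (by simp [hj']))]
      rw [if_pos hd, if_pos hd]
      rw [Prod.mk.injEq]
      constructor
      · rw [List.set_set, getD_set_self c i _ 0 (by omega)]
        congr 1
        ring
      · have hmap : (js.map (fun j' => if PySem.Int.mod (l.getD i 0) (l.getD j' 0) = 0 then (c.set i (c.getD i 0 + 1)).getD j' 0 else 0))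
            = js.map (fun j' => if PySem.Int.mod (l.getD i 0) (l.getD j' 0) = 0 then c.getD j' 0 else 0) := by
          apply List.map_congr_left
          intro j' hj'
          rw [getD_set_ne c i j' _ 0 (hne j' (by simp [hj']))]
        rw [hmap]
        ring
    · rw [if_neg (show ¬ PySem.Int.mod (l.getD i 0) (l.getD j 0) = 0 from hd)]
      rw [ih c _ hlen hi (fun j' hj' => hne j' (by simp [hj']))]
      rw [if_neg hd, if_neg hd]
      simp

-- A's outer loop, characterized
theorem outer_loop (l : List Int) :
    ∀ (i : Nat), i ≤ l.length →
      (List.range i).foldl (fun (st : List Int × Int) i =>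
        (List.range i).foldl (fun st j =>
          if PySem.Int.mod (l.getD i 0) (l.getD j 0) = 0 then
            let c := st.1.set i (st.1.getD i 0 + 1)
            (c, st.2 + c.getD j 0)
          else st) st) (List.replicate l.length 0, 0)
      = (Cvec l i,
         ∑ i' ∈ Finset.range i, ∑ j ∈ Finset.range i', (if PySem.Int.mod (l.getD i' 0) (l.getD j 0) = 0 then Lv l j else 0)) := by
  intro i
  induction i with
  | zero => intro _; simp [Cvec_zero]
  | succ i ih =>
    intro hi1
    have hi : i < l.length := by omega
    rw [List.range_succ, List.foldl_append, ih (by omega), List.foldl_cons, List.foldl_nil]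
    rw [inner_loop l i (List.range i) (Cvec l i) _ (Cvec_length l i) hi
        (fun j hj => by have := List.mem_range.mp hj; omega)]
    rw [Prod.mk.injEq]
    constructor
    · rw [Cvec_getD l i i hi, if_neg (by omega), Cvec_succ l i hi]
      simp [Lv]
    · have hmap : (List.range i).map (fun j => if PySem.Int.mod (l.getD i 0) (l.getD j 0) = 0 then (Cvec l i).getD j 0 else 0)
          = (List.range i).map (fun j => if PySem.Int.mod (l.getD i 0) (l.getD j 0) = 0 then Lv l j else 0) := by
        apply List.map_congr_left
        intro j hj
        have hj' := List.mem_range.mp hj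
        rw [Cvec_getD l i j (by omega), if_pos hj']
      rw [hmap, Finset.sum_range_succ, sum_map_range]

-- regrouping the triangular double sum around its inner index
theorem sum_swap_tri (F : Nat → Nat → Int) (n : Nat) :
    ∑ i ∈ Finset.range n, ∑ j ∈ Finset.range i, F i j
      = ∑ j ∈ Finset.range n, ∑ i ∈ Finset.range n, (if j < i then F i j else 0) := by
  induction n with
  | zero => simp
  | succ n ih =>
    have expand : ∑ j ∈ Finset.range (n+1), ∑ i ∈ Finset.range (n+1), (if j < i then F i j else 0)
        = ∑ j ∈ Finset.range (n+1), ((∑ i ∈ Finset.range n, if j < i then F i j else 0) + (if j < n then F n j else 0)) :=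
      Finset.sum_congr rfl (fun j _ => Finset.sum_range_succ _ n)
    rw [Finset.sum_range_succ, ih, expand, Finset.sum_add_distrib, Finset.sum_range_succ, Finset.sum_range_succ]
    have h1 : ∑ i ∈ Finset.range n, (if n < i then F i n else 0) = 0 :=
      Finset.sum_eq_zero (fun i hi => if_neg (by have := Finset.mem_range.mp hi; omega))
    have h2 : ∑ j ∈ Finset.range n, (if j < n then F n j else 0) = ∑ j ∈ Finset.range n, F n j :=
      Finset.sum_congr rfl (fun j hj => if_pos (Finset.mem_range.mp hj))
    rw [h1, h2, if_neg (by omega)]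
    ring

theorem Rv_eq (l : List Int) (n j : Nat) :
    Rv l n j = ∑ i ∈ Finset.range n, (if j < i ∧ PySem.Int.mod (l.getD i 0) (l.getD j 0) = 0 then (1:Int) else 0) := by
  rw [Rv, sum_map_range]

theorem solution_eq (l : List Int) :
    solution l = ∑ j ∈ Finset.range l.length, Lv l j * Rv l l.length j := by
  have h : solution l = ((List.range l.length).foldl (fun (st : List Int × Int) i =>
      (List.range i).foldl (fun st j =>
        if PySem.Int.mod (l.getD i 0) (l.getD j 0) = 0 then
          let c := st.1.set i (st.1.getD i 0 + 1)
          (c, st.2 + c.getD j 0)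
        else st) st) (List.replicate l.length 0, 0)).2 := rfl
  rw [h, outer_loop l l.length le_rfl]
  rw [sum_swap_tri (fun i j => if PySem.Int.mod (l.getD i 0) (l.getD j 0) = 0 then Lv l j else 0) l.length]
  simp only
  apply Finset.sum_congr rfl
  intro j _
  rw [Rv_eq, Finset.mul_sum]
  apply Finset.sum_congr rfl
  intro i _
  by_cases h1 : j < i
  · rw [if_pos h1]
    by_cases h2 : PySem.Int.mod (l.getD i 0) (l.getD j 0) = 0
    · rw [if_pos h2, if_pos ⟨h1, h2⟩, mul_one]
    · rw [if_neg h2, if_neg (by tauto), mul_zero]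
  · rw [if_neg h1, if_neg (by tauto), mul_zero]

theorem cntL_eq (l : List Int) (j : Nat) : cntL l j = Lv l j := by
  simpa [cntL, Lv] using
    foldl_if_count (fun m => PySem.Int.mod (l.getD j 0) (l.getD m 0) = 0) (List.range j) 0

theorem cntR_eq (l : List Int) (n j : Nat) : cntR l n j = Rv l n j := by
  simpa [cntR, Rv] using
    foldl_if_count (fun k => j < k ∧ PySem.Int.mod (l.getD k 0) (l.getD j 0) = 0) (List.range n) 0

theorem solution_alt_eq (l : List Int) :
    solution_alt l = ∑ j ∈ Finset.range l.length, Lv l j * Rv l l.length j := by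
  have h : solution_alt l = (((List.range l.length).map (cntL l)).zip
      ((List.range l.length).map (cntR l l.length))).foldl (fun a p => a + p.1 * p.2) 0 := rfl
  rw [h, List.zip_map', List.foldl_map, foldl_addf (fun j => cntL l j * cntR l l.length j),
      zero_add, sum_map_range]
  exact Finset.sum_congr rfl (fun j _ => by rw [cntL_eq, cntR_eq])

-- ===== VERDICT (by name: the statement is the Claim_ definition above) =====
theorem solution_spec : Claim_equal_solution := by
  intro l _ _
  unfold Spec_solution
  rw [solution_eq, solution_alt_eq]
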